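-- pv_equiv track=rewrite | github.com/dotzo/AdventOfCode2020 | AdventOfCode2020/Day-24.py | getBlackTiles
-- ===== SOURCE A (Python) =====
-- def getTile(instructions, q, r):
--     while instructions:
--         i = instructions[0]
--         j = None
--
--         # q row
--         if i == 'w':
--             q -= 1
--             j = None
--         elif i == 'e':
--             q += 1
--             j = None
--         elif i == 'n':
--             j = instructions[1]
--             r += 1
--             q += 0 if j == 'w' else 1
--         elif i == 's':
--             j = instructions[1]
--             r -= 1
--             q -= 0 if j == 'e' else 1
--
--         instructions = instructions[2:] if j else instructions[1:]
--
--     return (q, r)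
--
-- def getBlackTiles(inst_set):
--     black_tiles = set()
--     coords = None
--     for inst in inst_set:
--         coords = getTile(inst, 0,0)
--         if coords in black_tiles:
--             black_tiles.remove(coords)
--         else:
--             black_tiles.add(coords)
--
--     return black_tiles
-- ===== SOURCE B (Python) =====
-- def getTile(instructions, q, r):
--     # index-based token scan: 'n'/'s' pair with the following character,
--     # every other character is a single token
--     i = 0
--     n = len(instructions)
--     while i < n:
--         c = instructions[i]
--         if c == 'n' or c == 's':
--             j = instructions[i + 1]
--             if c == 'n':
--                 q += 0 if j == 'w' else 1
--                 r += 1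
--             else:
--                 q -= 0 if j == 'e' else 1
--                 r -= 1
--             i += 2
--         else:
--             if c == 'w':
--                 q -= 1
--             elif c == 'e':
--                 q += 1
--             i += 1
--     return (q, r)
--
-- def getBlackTiles(inst_set):
--     # A tile ends up black iff it was flipped an odd number of times:
--     # tally the flips per tile, then keep the tiles with an odd tally.
--     counts = {}
--     for inst in inst_set:
--         t = getTile(inst, 0, 0)
--         counts[t] = counts.pop(t, 0) + 1
--     return {t for t, c in counts.items() if c % 2 == 1}
-- ===== Notes on version B (the rewrite author's own statement) =====
-- stated objective: alternative
-- what changed: Replaces A's incremental black-tile set toggle (membership test + add/remove per line) with a tally-then-filter decomposition (count each tile's flips in a dict, then keep the tiles flipped an odd number of times), and replaces the slicing parser with an index-based token scan; Pre_ excludes only inputs on which A raises IndexError (a line ending in a bare 'n'/'s').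
import Mathlib
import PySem

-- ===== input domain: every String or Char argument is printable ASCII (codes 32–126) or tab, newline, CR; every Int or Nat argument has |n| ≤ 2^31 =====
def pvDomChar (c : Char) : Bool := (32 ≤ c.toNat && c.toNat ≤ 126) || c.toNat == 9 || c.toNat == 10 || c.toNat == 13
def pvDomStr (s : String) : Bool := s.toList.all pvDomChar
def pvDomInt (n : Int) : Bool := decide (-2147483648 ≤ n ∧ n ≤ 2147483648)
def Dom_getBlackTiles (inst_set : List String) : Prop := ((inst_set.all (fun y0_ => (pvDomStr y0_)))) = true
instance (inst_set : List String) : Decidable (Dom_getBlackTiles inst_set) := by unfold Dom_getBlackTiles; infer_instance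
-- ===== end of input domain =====

-- B replaces A's incremental set-toggle with a tally-then-filter-by-parity
-- decomposition (count each tile's flips in a dict, keep the tiles flipped an
-- odd number of times) and an index-based parser; objective: alternative.

-- ===== PORT A =====
-- A's per-line parser (slicing scan); where Python raises IndexError (a bare
-- trailing 'n'/'s', excluded by Pre_) the port returns the current (q, r).
def getTile : List Char → Int → Int → Int × Int
  | [], q, r => (q, r)
  | i :: rest, q, r =>
    if i = 'w' then getTile rest (q - 1) r
    else if i = 'e' then getTile rest (q + 1) r
    else if i = 'n' then
      match rest with
      | [] => (q, r)  -- Python: instructions[1] raises IndexError (outside Pre_)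
      | j :: rest' => getTile rest' (q + (if j = 'w' then 0 else 1)) (r + 1)
    else if i = 's' then
      match rest with
      | [] => (q, r)  -- Python: instructions[1] raises IndexError (outside Pre_)
      | j :: rest' => getTile rest' (q - (if j = 'e' then 0 else 1)) (r - 1)
    else getTile rest q r

def getBlackTiles (inst_set : List String) : List (Int × Int) :=
  inst_set.foldl
    (fun black_tiles inst =>
      let coords := getTile inst.toList 0 0
      if PySem.Set.contains black_tiles coords then
        (PySem.Set.remove? black_tiles coords).getD black_tiles
      else
        PySem.Set.add black_tiles coords)
    PySem.Set.empty

-- ===== PORT B =====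
-- Source B's parser: an index-based token scan ('n'/'s' pair with the next char,
-- everything else is a single token); same IndexError corner as A's, outside Pre_.
def getTileB : List Char → Int → Int → Int × Int
  | [], q, r => (q, r)
  | c :: rest, q, r =>
    if c = 'n' || c = 's' then
      match rest with
      | [] => (q, r)  -- Python: instructions[i + 1] raises IndexError (outside Pre_)
      | j :: rest' =>
        if c = 'n' then getTileB rest' (q + (if j = 'w' then 0 else 1)) (r + 1)
        else getTileB rest' (q - (if j = 'e' then 0 else 1)) (r - 1)
    else if c = 'w' then getTileB rest (q - 1) r
    else if c = 'e' then getTileB rest (q + 1) r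
    else getTileB rest q r

-- counts[t] = counts.pop(t, 0) + 1  (pop reads with default 0 and removes the key;
-- the assignment then inserts it afresh)
def getBlackTiles_alt (inst_set : List String) : List (Int × Int) :=
  let counts := inst_set.foldl
    (fun (counts : PySem.Dict (Int × Int) Int) inst =>
      let t := getTileB inst.toList 0 0
      (counts.erase t).insert t (counts.getD t 0 + 1))
    PySem.Dict.empty
  PySem.Set.ofList
    ((counts.items.filter (fun p => PySem.Int.mod p.2 2 == 1)).map Prod.fst)

-- ===== PRECONDITION & SPEC =====
-- Pre_ excludes exactly the inputs on which Python A raises IndexError: a line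
-- crashes the scan (instructions[1] on a lone 'n'/'s') iff its trailing run of
-- 'n'/'s' characters has odd length ('n'/'s' consume two characters, everything
-- else consumes one), so every line must end in an even-length run of 'n'/'s'.
def Pre_getBlackTiles (inst_set : List String) : Prop :=
  inst_set.all
    (fun s => (s.toList.reverse.takeWhile (fun c => c = 'n' || c = 's')).length % 2 == 0) = true
instance (inst_set : List String) : Decidable (Pre_getBlackTiles inst_set) := by
  unfold Pre_getBlackTiles; infer_instance

def pvWitness_getBlackTiles : List String := ["esew", "nwe"]

def Spec_getBlackTiles (inst_set : List String) (out : List (Int × Int)) : Prop := out = getBlackTiles_alt inst_set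
instance (inst_set : List String) (out : List (Int × Int)) : Decidable (Spec_getBlackTiles inst_set out) := by unfold Spec_getBlackTiles; infer_instance

-- ===== CLAIM (what is proved, stated in full; the proofs are below) =====
def Claim_equal_getBlackTiles : Prop := ∀ (inst_set : List String), Dom_getBlackTiles inst_set → Pre_getBlackTiles inst_set → Spec_getBlackTiles inst_set (getBlackTiles inst_set)

-- ===== LEMMAS AND PROOFS =====

lemma getTileB_eq : ∀ (l : List Char) (q r : Int), getTileB l q r = getTile l q r
  | [], _, _ => rfl
  | c :: rest, q, r => by
    by_cases hn : c = 'n'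
    · subst hn
      cases rest with
      | nil => rfl
      | cons j rest' =>
        simp [getTileB, getTile]
        exact getTileB_eq rest' _ _
    · by_cases hs : c = 's'
      · subst hs
        cases rest with
        | nil => rfl
        | cons j rest' =>
          simp [getTileB, getTile]
          exact getTileB_eq rest' _ _
      · by_cases hw : c = 'w'
        · subst hw
          cases rest with
          | nil => simp [getTileB, getTile]
          | cons j rest' =>
            simp [getTileB, getTile]
            exact getTileB_eq (j :: rest') _ _
        · by_cases he : c = 'e'
          · subst he
            cases rest with
            | nil => simp [getTileB, getTile]
            | cons j rest' =>
              simp [getTileB, getTile]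
              exact getTileB_eq (j :: rest') _ _
          · cases rest with
            | nil => simp [getTileB, getTile, hn, hs, hw, he]
            | cons j rest' =>
              simp [getTileB, getTile, hn, hs, hw, he]
              exact getTileB_eq (j :: rest') _ _

lemma foldl_add_eq {α : Type} [BEq α] [LawfulBEq α] (l : List α) (s : List α) :
    l.foldl PySem.Set.add s = s ++ (PySem.Set.ofList l).filter (fun x => !s.contains x) := by
  induction l generalizing s with
  | nil => simp [PySem.Set.ofList, PySem.Set.empty]
  | cons a l ih =>
    have hof : PySem.Set.ofList (a :: l) = List.foldl PySem.Set.add (PySem.Set.add PySem.Set.empty a) l := by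
      simp [PySem.Set.ofList]
    rw [List.foldl_cons, ih, hof]
    have hemp : PySem.Set.add PySem.Set.empty a = [a] := by
      simp [PySem.Set.add, PySem.Set.empty, PySem.Set.contains]
    rw [hemp, ih]
    by_cases ha : a ∈ s
    · have h1 : PySem.Set.add s a = s := by
        simp [PySem.Set.add, PySem.Set.contains, ha]
      rw [h1]
      rw [List.filter_append]
      have h2 : List.filter (fun x => !s.contains x) [a] = [] := by
        simp [ha]
      rw [h2, List.nil_append, List.filter_filter]
      congr 1
      apply List.filter_congr
      intro x hx
      by_cases hxs : x ∈ s
      · simp [hxs]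
      · have hxa : x ≠ a := fun h => hxs (h ▸ ha)
        simp [hxs, hxa]
    · have h1 : PySem.Set.add s a = s ++ [a] := by
        simp [PySem.Set.add, PySem.Set.contains, ha]
      rw [h1]
      rw [List.filter_append]
      have h2 : List.filter (fun x => !s.contains x) [a] = [a] := by
        simp [ha]
      rw [h2, List.filter_filter, ← List.append_assoc]
      congr 1
      apply List.filter_congr
      intro x hx
      by_cases hxa : x = a
      · subst hxa; simp
      · by_cases hxs : x ∈ s <;>
          simp [List.mem_append, hxs, hxa]

lemma ofList_cons {α : Type} [BEq α] [LawfulBEq α] (x : α) (l : List α) :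
    PySem.Set.ofList (x :: l) = x :: (PySem.Set.ofList l).filter (fun y => y != x) := by
  have h : PySem.Set.ofList (x :: l) = List.foldl PySem.Set.add [x] l := by
    simp [PySem.Set.ofList, PySem.Set.add, PySem.Set.empty, PySem.Set.contains]
  rw [h, foldl_add_eq]
  simp only [List.singleton_append, List.cons.injEq, true_and]
  apply List.filter_congr
  intro y hy
  simp [bne]

lemma ofList_nodup_id {α : Type} [BEq α] [LawfulBEq α] (l : List α) (h : l.Nodup) :
    PySem.Set.ofList l = l := by
  induction l with
  | nil => simp [PySem.Set.ofList, PySem.Set.empty]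
  | cons a l ih =>
    rw [ofList_cons, ih h.of_cons]
    have : l.filter (fun y => y != a) = l := by
      apply List.filter_eq_self.mpr
      intro x hx
      have : x ≠ a := fun he => (List.nodup_cons.mp h).1 (he ▸ hx)
      simp [this]
    rw [this]

def tstep (s : List (Int × Int)) (t : Int × Int) : List (Int × Int) :=
  if PySem.Set.contains s t then (PySem.Set.remove? s t).getD s else PySem.Set.add s t

-- the distinct tiles of ts ordered by LAST occurrence
def lastOrd (ts : List (Int × Int)) : List (Int × Int) :=
  (PySem.List.dedup ts.reverse).reverse

-- A's toggle result: odd-count tiles in last-occurrence order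
def bres (ts : List (Int × Int)) : List (Int × Int) :=
  (lastOrd ts).filter (fun t => ts.count t % 2 == 1)

-- B's tally dict step
def dstep (d : PySem.Dict (Int × Int) Int) (t : Int × Int) : PySem.Dict (Int × Int) Int :=
  (d.erase t).insert t (d.getD t 0 + 1)

lemma lastOrd_nodup (ts : List (Int × Int)) : (lastOrd ts).Nodup :=
  List.nodup_reverse.mpr (PySem.List.nodup_dedup ts.reverse)

lemma bres_nodup (ts : List (Int × Int)) : (bres ts).Nodup :=
  (lastOrd_nodup ts).filter _

lemma mem_bres (ts : List (Int × Int)) (t : Int × Int) :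
    t ∈ bres ts ↔ (ts.count t % 2 == 1) = true := by
  unfold bres
  rw [List.mem_filter]
  constructor
  · exact fun h => h.2
  · intro h
    refine ⟨?_, h⟩
    unfold lastOrd
    rw [List.mem_reverse, PySem.List.mem_dedup, List.mem_reverse]
    have : 0 < ts.count t := by
      rcases Nat.eq_zero_or_pos (ts.count t) with h0 | h0
      · rw [h0] at h; simp at h
      · exact h0
    exact List.count_pos_iff.mp this

lemma lastOrd_snoc (ts : List (Int × Int)) (t : Int × Int) :
    lastOrd (ts ++ [t]) = (lastOrd ts).filter (fun y => y != t) ++ [t] := by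
  unfold lastOrd
  have h1 : (ts ++ [t]).reverse = t :: ts.reverse := by simp
  rw [h1]
  show (PySem.Set.ofList (t :: ts.reverse)).reverse = _
  rw [ofList_cons]
  simp only [List.reverse_cons]
  rw [← List.filter_reverse]
  rfl

lemma toggle_eq (ts : List (Int × Int)) : ts.foldl tstep [] = bres ts := by
  induction ts using List.reverseRecOn with
  | nil => rfl
  | append_singleton ts t ih =>
    rw [List.foldl_append, List.foldl_cons, List.foldl_nil, ih]
    have hcntt : (ts ++ [t]).count t = ts.count t + 1 := by
      simp [List.count_append]
    have hcnt_ne : ∀ x : Int × Int, x ≠ t → (ts ++ [t]).count x = ts.count x := by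
      intro x hx
      simp [List.count_append, Ne.symm hx]
    have hR : bres (ts ++ [t])
        = (lastOrd ts).filter
            (fun a => (ts ++ [t]).count a % 2 == 1 && a != t)
          ++ List.filter (fun a => (ts ++ [t]).count a % 2 == 1) [t] := by
      unfold bres
      rw [lastOrd_snoc, List.filter_append, List.filter_filter]
    rw [hR]
    by_cases hp : (ts.count t % 2 == 1) = true
    · have hmem : t ∈ bres ts := (mem_bres ts t).mpr hp
      have hcont : PySem.Set.contains (bres ts) t = true := by
        simp [PySem.Set.contains, hmem]
      unfold tstep
      rw [if_pos hcont]
      have hrem : (PySem.Set.remove? (bres ts) t).getD (bres ts)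
          = (bres ts).filter (fun y => !y == t) := by
        simp [PySem.Set.remove?, PySem.Set.discard, PySem.Set.contains, hmem]
      rw [hrem]
      have hp' : ts.count t % 2 = 1 := by simpa using hp
      have hpt : ((ts ++ [t]).count t % 2 == 1) = false := by
        rw [hcntt, beq_eq_false_iff_ne]; omega
      have hft : List.filter (fun a => (ts ++ [t]).count a % 2 == 1) [t] = [] := by
        simp only [List.filter_cons, List.filter_nil, hpt]
        simp
      rw [hft, List.append_nil]
      unfold bres
      rw [List.filter_filter]
      apply List.filter_congr
      intro x hx
      by_cases hxt : x = t
      · subst hxt; simp [hp]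
      · rw [hcnt_ne x hxt]
        simp [bne, Bool.and_comm]
    · have hmem : t ∉ bres ts := fun h => hp ((mem_bres ts t).mp h)
      have hcont : PySem.Set.contains (bres ts) t = false := by
        simp [PySem.Set.contains]; exact hmem
      unfold tstep
      rw [hcont]
      simp only [Bool.false_eq_true, if_false]
      have hadd : PySem.Set.add (bres ts) t = bres ts ++ [t] := by
        simp [PySem.Set.add, PySem.Set.contains, hmem]
      rw [hadd]
      have hp' : ¬ ts.count t % 2 = 1 := by simpa using hp
      have hpt : ((ts ++ [t]).count t % 2 == 1) = true := by
        rw [hcntt, beq_iff_eq]; omega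
      have hft : List.filter (fun a => (ts ++ [t]).count a % 2 == 1) [t] = [t] := by
        simp only [List.filter_cons, List.filter_nil, hpt]
        simp
      rw [hft]
      congr 1
      unfold bres
      apply List.filter_congr
      intro x hx
      by_cases hxt : x = t
      · subst hxt
        simp [hp']
      · rw [hcnt_ne x hxt]
        simp [bne, hxt, Bool.and_comm]

-- the tally dict's items are the tiles in last-occurrence order with their counts
lemma tally_items (ts : List (Int × Int)) :
    (ts.foldl dstep PySem.Dict.empty).items
      = (lastOrd ts).map (fun x => (x, (ts.count x : Int))) := by
  induction ts using List.reverseRecOn with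
  | nil => rfl
  | append_singleton ts t ih =>
    rw [List.foldl_append, List.foldl_cons, List.foldl_nil]
    set d := ts.foldl dstep PySem.Dict.empty with hd
    have hnd : (lastOrd ts).Nodup := lastOrd_nodup ts
    have herase : (d.erase t).items
        = ((lastOrd ts).filter (fun y => y != t)).map (fun x => (x, (ts.count x : Int))) := by
      show (d.items.filter (fun p => !p.1 == t)) = _
      rw [ih, List.filter_map]
      rfl
    have hncont : (d.erase t).contains t = false := by
      have : ∀ p ∈ (d.erase t).items, p.1 ≠ t := by
        intro p hp
        rw [herase] at hp
        obtain ⟨x, hx, hpx⟩ := List.mem_map.mp hp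
        have := (List.mem_filter.mp hx).2
        simp only [← hpx]
        simpa using this
      rcases h : (d.erase t).contains t with _ | _
      · rfl
      · exfalso
        have hk : t ∈ (d.erase t).keys := (PySem.Dict.contains_iff_mem_keys _ _).mp h
        obtain ⟨p, hp, hpt⟩ := List.mem_map.mp hk
        exact this p hp hpt
    have hgetD : d.getD t 0 = (ts.count t : Int) := by
      by_cases hmem : t ∈ lastOrd ts
      · have hitem : (t, (ts.count t : Int)) ∈ d.items := by
          rw [ih]; exact List.mem_map.mpr ⟨t, hmem, rfl⟩
        have hkeys : d.keys.Nodup := by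
          show (d.items.map Prod.fst).Nodup
          rw [ih, List.map_map]
          have hcomp : (Prod.fst ∘ fun x : Int × Int => (x, (ts.count x : Int))) = id := rfl
          rw [hcomp, List.map_id]
          exact hnd
        exact PySem.Dict.getD_of_mem_items d hitem hkeys 0
      · have hcnt0 : ts.count t = 0 := by
          rw [List.count_eq_zero]
          intro hmem'
          exact hmem (by
            unfold lastOrd
            rw [List.mem_reverse, PySem.List.mem_dedup, List.mem_reverse]
            exact hmem')
        have hc : d.contains t = false := by
          rcases h : d.contains t with _ | _
          · rfl
          · exfalso
            have hk : t ∈ d.keys := (PySem.Dict.contains_iff_mem_keys _ _).mp h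
            obtain ⟨p, hp, hpt⟩ := List.mem_map.mp hk
            rw [ih] at hp
            obtain ⟨x, hx, hpx⟩ := List.mem_map.mp hp
            apply hmem
            rw [← hpt, ← hpx]
            exact hx
        rw [PySem.Dict.getD_of_not_contains d 0 hc, hcnt0]
        rfl
    show ((d.erase t).insert t (d.getD t 0 + 1)).items = _
    rw [PySem.Dict.items_insert_of_not_contains _ _ hncont, herase, hgetD, lastOrd_snoc,
        List.map_append]
    congr 1
    · apply List.map_congr_left
      intro x hx
      have hxt : x ≠ t := by simpa using (List.mem_filter.mp hx).2
      have : (ts ++ [t]).count x = ts.count x := by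
        simp [List.count_append, Ne.symm hxt]
      rw [this]
    · simp [List.count_append]

lemma mod_two_beq (c : Nat) : (PySem.Int.mod (c : Int) 2 == 1) = (c % 2 == 1) := by
  have h2 : (2 : Int) = ((2 : Nat) : Int) := by norm_cast
  rw [h2, PySem.Int.mod_natCast]
  simp
  omega

-- ===== VERDICT (by name: the statement is the Claim_ definition above) =====
theorem getBlackTiles_spec : Claim_equal_getBlackTiles := by
  intro inst_set _ _
  show getBlackTiles inst_set = getBlackTiles_alt inst_set
  set ts := inst_set.map (fun inst => getTile inst.toList 0 0) with hts
  have hA : getBlackTiles inst_set = List.foldl tstep [] ts := by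
    rw [hts, List.foldl_map]
    rfl
  have hB : getBlackTiles_alt inst_set
      = PySem.Set.ofList
          (((ts.foldl dstep PySem.Dict.empty).items.filter
              (fun p => PySem.Int.mod p.2 2 == 1)).map Prod.fst) := by
    unfold getBlackTiles_alt
    rw [hts, List.foldl_map]
    simp only [getTileB_eq]
    rfl
  rw [hA, hB, toggle_eq, tally_items, List.filter_map, List.map_map]
  have hfil : (lastOrd ts).filter
        ((fun p : (Int × Int) × Int => PySem.Int.mod p.2 2 == 1) ∘ fun x => (x, (ts.count x : Int)))
      = bres ts := by
    unfold bres
    apply List.filter_congr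
    intro x hx
    simp only [Function.comp]
    exact mod_two_beq (ts.count x)
  rw [hfil]
  have hcomp : (Prod.fst ∘ fun x : Int × Int => (x, (ts.count x : Int))) = id := rfl
  rw [hcomp, List.map_id, ofList_nodup_id _ (bres_nodup ts)]
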